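-- pv_equiv track=rewrite | github.com/khides/pyworks | my_module.py | find_up
-- ===== SOURCE A (Python) =====
-- def find_up(data,b):
--     data_up=sorted(data)
--     start=0
--     end=len(data)
--     while start!=end:
--         center=(start+end)//2
--         if data_up[center]==b:
--             while data_up[center]==b:
--                 center+=1
--             return center
--         if b<data_up[center]:
--             end=center
--         else:
--             start=center+1
-- ===== SOURCE B (Python) =====
-- def find_up(data, b):
--     # One linear pass: count elements <= b and record whether b occurs.
--     le = 0
--     present = False
--     for x in data:
--         if x <= b:
--             le += 1
--         if x == b:
--             present = True
--     return le if present else None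
-- ===== Notes on version B (the rewrite author's own statement) =====
-- stated objective: alternative
-- what changed: Replaces sort + binary search + linear walk past the last occurrence by a single unsorted pass that counts elements <= b and checks membership of b; Pre_ excludes only the inputs where A raises IndexError (b present and equal to the maximum).
import Mathlib
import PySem

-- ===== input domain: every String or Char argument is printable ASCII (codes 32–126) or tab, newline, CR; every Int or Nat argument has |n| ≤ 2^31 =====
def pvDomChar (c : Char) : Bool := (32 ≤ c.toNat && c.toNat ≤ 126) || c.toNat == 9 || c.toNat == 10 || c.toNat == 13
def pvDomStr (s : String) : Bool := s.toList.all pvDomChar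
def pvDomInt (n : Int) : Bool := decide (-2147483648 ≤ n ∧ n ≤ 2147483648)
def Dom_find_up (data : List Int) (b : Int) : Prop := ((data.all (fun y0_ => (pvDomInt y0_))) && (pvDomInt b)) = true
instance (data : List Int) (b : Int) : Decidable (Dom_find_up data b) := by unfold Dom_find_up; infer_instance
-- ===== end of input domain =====

-- B replaces A's sort + binary search + walk past the last duplicate by a single counting pass over the unsorted data.


-- ===== PORT A =====
-- inner 'while data_up[center]==b: center+=1; return center'.
-- l[center]? = none is Python's IndexError (excluded by Pre_find_up); the port returns none there.
def pvInnerA (l : List Int) (b : Int) (center : Nat) : Option Int :=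
  match h : l[center]? with
  | none => none
  | some v => if v = b then pvInnerA l b (center + 1) else some (center : Int)
termination_by l.length - center
decreasing_by
  have hlt : center < l.length := (List.getElem?_eq_some_iff.mp h).1
  omega

-- outer 'while start!=end' binary-search loop; start/stop stay nonnegative in Python, so Nat.
-- fuel only guards totality: each iteration shrinks stop-start, so fuel = len+1 is never exhausted
-- on the reachable states (proved in the lemmas below).
def pvOuterA (l : List Int) (b : Int) (fuel start stop : Nat) : Option Int :=
  match fuel with
  | 0 => none
  | fuel + 1 =>
    if start = stop then none
    else
      let center := (start + stop) / 2   -- '(start+end)//2', both nonneg: Nat division = Python //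
      match l[center]? with
      | none => none                     -- IndexError (unreachable from find_up's initial state)
      | some v =>
        if v = b then pvInnerA l b center
        else if b < v then pvOuterA l b fuel start center
        else pvOuterA l b fuel (center + 1) stop

def find_up (data : List Int) (b : Int) : Option Int :=
  let data_up := PySem.List.sorted data (fun x => x) false
  pvOuterA data_up b (data.length + 1) 0 data.length

-- ===== PORT B =====
-- single pass: count elements <= b, record presence of b
def find_up_alt (data : List Int) (b : Int) : Option Int :=
  let acc := data.foldl
    (fun (p : Int × Bool) x => ((if x ≤ b then p.1 + 1 else p.1), (p.2 || decide (x = b))))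
    (0, false)
  if acc.2 then some acc.1 else none

-- ===== PRECONDITION & SPEC =====
-- Pre_ excludes exactly the inputs where A raises IndexError: b occurs in data and is its maximum
-- (A's walk past the last occurrence of b runs off the end of the sorted list).
def Pre_find_up (data : List Int) (b : Int) : Prop := ¬ (b ∈ data ∧ ∀ x ∈ data, x ≤ b)
instance (data : List Int) (b : Int) : Decidable (Pre_find_up data b) := by unfold Pre_find_up; infer_instance
def pvWitness_find_up : List Int × Int := ([1, 2, 2, 3], 2)

def Spec_find_up (data : List Int) (b : Int) (out : Option Int) : Prop := out = find_up_alt data b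
instance (data : List Int) (b : Int) (out : Option Int) : Decidable (Spec_find_up data b out) := by unfold Spec_find_up; infer_instance

-- ===== CLAIM (what is proved, stated in full; the proofs are below) =====
def Claim_equal_find_up : Prop := ∀ (data : List Int) (b : Int), Dom_find_up data b → Pre_find_up data b → Spec_find_up data b (find_up data b)

-- ===== LEMMAS AND PROOFS =====

-- B's fold computes (count of elements <= b, membership of b)
theorem pvFoldB (b : Int) (data : List Int) (n : Int) (p : Bool) :
    data.foldl
      (fun (q : Int × Bool) x => ((if x ≤ b then q.1 + 1 else q.1), (q.2 || decide (x = b))))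
      (n, p)
    = (n + (data.countP (fun x => decide (x ≤ b)) : Nat), p || decide (b ∈ data)) := by
  induction data generalizing n p with
  | nil => simp
  | cons x xs ih =>
    simp only [List.foldl_cons, ih, List.countP_cons, List.mem_cons, Prod.mk.injEq]
    constructor
    · by_cases hx : x ≤ b <;> simp [hx] <;> push_cast <;> ring
    · by_cases hx : x = b
      · simp [hx]
      · have hbx : ¬ b = x := fun h => hx h.symm
        simp [hx, hbx]

theorem find_up_alt_eq (data : List Int) (b : Int) :
    find_up_alt data b
    = if b ∈ data then some ((data.countP (fun x => decide (x ≤ b)) : Nat) : Int) else none := by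
  unfold find_up_alt
  rw [pvFoldB]
  by_cases hb : b ∈ data <;> simp [hb]

theorem pvInnerA_eq (l : List Int) (b : Int) (c : Nat)
    (hmono : ∀ (p q : Nat) (hpq : p ≤ q) (hq : q < l.length),
      l[p]'(Nat.lt_of_le_of_lt hpq hq) ≤ l[q]'hq)
    (h1 : ∀ i, ∀ hi : i < l.length, i < c → l[i]'hi ≤ b)
    (h2 : ∀ i, ∀ hi : i < l.length, c ≤ i → b ≤ l[i]'hi)
    (h3 : ∃ j, ∃ hj : j < l.length, b < l[j]'hj) :
    pvInnerA l b c = some ((l.countP (fun x => decide (x ≤ b)) : Nat) : Int) := by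
  obtain ⟨j, hj, hjb⟩ := h3
  have hcj : c ≤ j := by
    by_contra hcj
    exact absurd (h1 j hj (by omega)) (by omega)
  have hc : c < l.length := by omega
  rw [pvInnerA]
  rw [List.getElem?_eq_getElem hc]
  simp only
  by_cases hv : l[c]'hc = b
  · rw [if_pos hv]
    exact pvInnerA_eq l b (c + 1) hmono
      (fun i hi hic => by
        rcases Nat.lt_or_ge i c with h | h
        · exact h1 i hi h
        · have : i = c := by omega
          subst this; exact le_of_eq hv)
      (fun i hi hic => h2 i hi (by omega))
      ⟨j, hj, hjb⟩
  · rw [if_neg hv]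
    have hbc : b < l[c]'hc := lt_of_le_of_ne (h2 c hc le_rfl) (fun h => hv h.symm)
    congr 1
    have hcount : l.countP (fun x => decide (x ≤ b)) = c := by
      conv_lhs => rw [← List.take_append_drop c l]
      rw [List.countP_append]
      have htake : (l.take c).countP (fun x => decide (x ≤ b)) = (l.take c).length := by
        apply List.countP_eq_length.2
        intro a ha
        obtain ⟨i, hi, rfl⟩ := List.getElem_of_mem ha
        have hi' : i < c := by simp [List.length_take] at hi; omega
        rw [List.getElem_take]
        simpa using h1 i (by simp at hi; omega) hi'
      have hdrop : (l.drop c).countP (fun x => decide (x ≤ b)) = 0 := by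
        apply List.countP_eq_zero.2
        intro a ha
        obtain ⟨i, hi, rfl⟩ := List.getElem_of_mem ha
        rw [List.getElem_drop]
        have hlt : b < l[c + i]'(by simp at hi; omega) :=
          lt_of_lt_of_le hbc (hmono c (c + i) (by omega) (by simp at hi; omega))
        simp only [decide_eq_true_eq]
        omega
      rw [htake, hdrop]
      simp [List.length_take]
      omega
    rw [hcount]
termination_by l.length - c
decreasing_by omega

theorem pvOuterA_eq (l : List Int) (b : Int)
    (hmono : ∀ (p q : Nat) (hpq : p ≤ q) (hq : q < l.length),
      l[p]'(Nat.lt_of_le_of_lt hpq hq) ≤ l[q]'hq)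
    (fuel s e : Nat) (hse : s ≤ e) (he : e ≤ l.length) (hfuel : e - s < fuel)
    (h1 : ∀ i, ∀ hi : i < l.length, i < s → l[i]'hi < b)
    (h2 : ∀ i, ∀ hi : i < l.length, e ≤ i → b < l[i]'hi)
    (h3 : b ∈ l → ∃ j, ∃ hj : j < l.length, b < l[j]'hj) :
    pvOuterA l b fuel s e
    = if b ∈ l then some ((l.countP (fun x => decide (x ≤ b)) : Nat) : Int) else none := by
  induction fuel generalizing s e with
  | zero => omega
  | succ f ih =>
    rw [pvOuterA]
    by_cases hstop : s = e
    · rw [if_pos hstop]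
      subst hstop
      rw [if_neg]
      intro hb
      obtain ⟨i, hi, rfl⟩ := List.getElem_of_mem hb
      rcases Nat.lt_or_ge i s with h | h
      · exact absurd (h1 i hi h) (lt_irrefl _)
      · exact absurd (h2 i hi h) (lt_irrefl _)
    · rw [if_neg hstop]
      have hslt : s < e := by omega
      have hcl : (s + e) / 2 < e := by omega
      have hcs : s ≤ (s + e) / 2 := by omega
      have hcll : (s + e) / 2 < l.length := by omega
      simp only [List.getElem?_eq_getElem hcll]
      by_cases hv : l[(s + e) / 2]'hcll = b
      · rw [if_pos hv]
        have hb : b ∈ l := hv ▸ List.getElem_mem hcll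
        rw [if_pos hb]
        exact pvInnerA_eq l b ((s + e) / 2) hmono
          (fun i hi hic => le_of_le_of_eq (hmono i _ (by omega) hcll) hv)
          (fun i hi hic => le_of_eq_of_le hv.symm (hmono _ i hic hi))
          (h3 hb)
      · rw [if_neg hv]
        by_cases hlt : b < l[(s + e) / 2]'hcll
        · rw [if_pos hlt]
          exact ih s ((s + e) / 2) (by omega) (by omega) (by omega) h1
            (fun i hi hic => lt_of_lt_of_le hlt (hmono _ i hic hi))
        · rw [if_neg hlt]
          have hvb : l[(s + e) / 2]'hcll < b := by
            rcases lt_or_eq_of_le (le_of_not_gt hlt) with h | h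
            · exact h
            · exact absurd h hv
          exact ih ((s + e) / 2 + 1) e (by omega) he (by omega)
            (fun i hi hic => lt_of_le_of_lt (hmono i _ (by omega) hcll) hvb) h2

-- ===== VERDICT (by name: the statement is the Claim_ definition above) =====
theorem find_up_spec : Claim_equal_find_up := by
  intro data b _ hpre
  unfold Spec_find_up
  have key : find_up data b
      = pvOuterA (PySem.List.sorted data (fun x => x) false) b (data.length + 1) 0 data.length :=
    rfl
  rw [key]
  have hperm := PySem.List.sorted_perm data (fun x : Int => x) false
  have hlen : (PySem.List.sorted data (fun x : Int => x) false).length = data.length :=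
    hperm.length_eq
  have hmono : ∀ (p q : Nat) (hpq : p ≤ q)
      (hq : q < (PySem.List.sorted data (fun x : Int => x) false).length),
      (PySem.List.sorted data (fun x : Int => x) false)[p]'(Nat.lt_of_le_of_lt hpq hq)
        ≤ (PySem.List.sorted data (fun x : Int => x) false)[q]'hq := by
    intro p q hpq hq
    exact PySem.List.sorted_id_getElem_mono data hpq hq
  rw [pvOuterA_eq (PySem.List.sorted data (fun x : Int => x) false) b hmono
      (data.length + 1) 0 data.length (by omega) (by omega) (by omega)
      (fun i hi h => absurd h (by omega))
      (fun i hi h => by omega)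
      (fun hb => by
        have hbd : b ∈ data := hperm.mem_iff.1 hb
        have hex : ∃ x ∈ data, b < x := by
          by_contra hall
          push Not at hall
          exact hpre ⟨hbd, fun y hy => hall y hy⟩
        obtain ⟨x, hx, hxb⟩ := hex
        have hxl : x ∈ PySem.List.sorted data (fun x : Int => x) false := hperm.mem_iff.2 hx
        obtain ⟨i, hi, rfl⟩ := List.getElem_of_mem hxl
        exact ⟨i, hi, hxb⟩)]
  rw [find_up_alt_eq]
  have hcnt : (PySem.List.sorted data (fun x : Int => x) false).countP (fun x => decide (x ≤ b))
      = data.countP (fun x => decide (x ≤ b)) := hperm.countP_eq _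
  rw [hcnt]
  by_cases hb : b ∈ data <;> simp [hperm.mem_iff, hb]
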